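-- pv_equiv track=rewrite | github.com/pypi-data/pypi-mirror-240 | packages/smart-home-tng/smart_home_tng-2023.1.10-py3-none-any.whl/smart_home_tng/components/alexa_media/alexa_media_flow_handler.py | _update_ord_dict
-- ===== SOURCE A (Python) =====
-- import typing
--
-- def _update_ord_dict(
--     old_dict: typing.OrderedDict, new_dict: dict
-- ) -> typing.OrderedDict:
--     result = typing.OrderedDict()
--     for k, v in old_dict.items():
--         for key, value in new_dict.items():
--             if k == key:
--                 result.update([(key, value)])
--                 break
--         if k not in result:
--             result.update([(k, v)])
--     return result
-- ===== SOURCE B (Python) =====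
-- import typing
--
-- def _update_ord_dict(old_dict, new_dict):
--     result = typing.OrderedDict(old_dict)
--     for key, value in new_dict.items():
--         if key in result:
--             result[key] = value
--     return result
-- ===== Notes on version B (the rewrite author's own statement) =====
-- stated objective: faster
-- what changed: B copies old_dict once and then does a single pass over new_dict updating only keys already present, instead of A's nested scan of new_dict for every old key; Pre_ excludes association lists with duplicate keys, which do not represent a Python dict (both real arguments are dicts).
import Mathlib
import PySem

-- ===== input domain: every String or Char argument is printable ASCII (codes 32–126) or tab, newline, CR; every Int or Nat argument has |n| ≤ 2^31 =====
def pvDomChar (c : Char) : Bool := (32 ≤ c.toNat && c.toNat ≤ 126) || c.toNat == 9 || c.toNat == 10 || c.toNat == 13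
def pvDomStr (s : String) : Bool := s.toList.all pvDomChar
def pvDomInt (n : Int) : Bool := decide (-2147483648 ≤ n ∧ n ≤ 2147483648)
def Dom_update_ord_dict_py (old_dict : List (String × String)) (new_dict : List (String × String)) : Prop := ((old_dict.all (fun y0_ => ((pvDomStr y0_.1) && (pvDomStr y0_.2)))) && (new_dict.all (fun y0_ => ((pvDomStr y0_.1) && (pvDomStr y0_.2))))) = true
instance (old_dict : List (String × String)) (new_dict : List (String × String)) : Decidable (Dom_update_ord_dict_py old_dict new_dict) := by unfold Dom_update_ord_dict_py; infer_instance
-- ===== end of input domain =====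

-- B replaces A's nested scan (for every old key, scan new_dict) by one copy of old_dict
-- followed by a single guarded-update pass over new_dict; same return value, simpler shape.

-- ===== PORT A =====
-- one step of A's outer loop body: inner scan of new_dict with break, then the 'k not in result' guard
def updA (new_dict : List (String × String)) (result : PySem.Dict String String)
    (kv : String × String) : PySem.Dict String String :=
  let result1 :=
    match new_dict.find? (fun p => p.1 == kv.1) with   -- 'for key, value in new_dict.items(): if k == key: …; break'
    | some p => result.insert p.1 p.2
    | none => result
  if result1.contains kv.1 then result1 else result1.insert kv.1 kv.2

def update_ord_dict_py (old_dict : List (String × String)) (new_dict : List (String × String)) : List (String × String) :=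
  (old_dict.foldl (updA new_dict) PySem.Dict.empty).items

-- ===== PORT B =====
-- one step of B's single pass over new_dict: update only keys already present
def updB (result : PySem.Dict String String) (kv : String × String) : PySem.Dict String String :=
  if result.contains kv.1 then result.insert kv.1 kv.2 else result

def update_ord_dict_py_alt (old_dict : List (String × String)) (new_dict : List (String × String)) : List (String × String) :=
  (new_dict.foldl updB
    (old_dict.foldl (fun d p => d.insert p.1 p.2) PySem.Dict.empty)).items   -- result = OrderedDict(old_dict)

-- ===== PRECONDITION & SPEC =====
-- Pre_ excludes association lists with duplicate keys: both parameters are Python dicts,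
-- whose item lists never carry a duplicate key, so nothing A returns on is excluded.
def Pre_update_ord_dict_py (old_dict : List (String × String)) (new_dict : List (String × String)) : Prop :=
  (old_dict.map Prod.fst).Nodup ∧ (new_dict.map Prod.fst).Nodup
instance (old_dict : List (String × String)) (new_dict : List (String × String)) : Decidable (Pre_update_ord_dict_py old_dict new_dict) := by unfold Pre_update_ord_dict_py; infer_instance

def pvWitness_update_ord_dict_py : (List (String × String)) × (List (String × String)) :=
  ([("a", "1"), ("b", "2")], [("b", "9"), ("c", "3")])

def Spec_update_ord_dict_py (old_dict : List (String × String)) (new_dict : List (String × String)) (out : List (String × String)) : Prop := out = update_ord_dict_py_alt old_dict new_dict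
instance (old_dict : List (String × String)) (new_dict : List (String × String)) (out : List (String × String)) : Decidable (Spec_update_ord_dict_py old_dict new_dict out) := by unfold Spec_update_ord_dict_py; infer_instance

-- ===== CLAIM (what is proved, stated in full; the proofs are below) =====
def Claim_equal_update_ord_dict_py : Prop := ∀ (old_dict : List (String × String)) (new_dict : List (String × String)), Dom_update_ord_dict_py old_dict new_dict → Pre_update_ord_dict_py old_dict new_dict → Spec_update_ord_dict_py old_dict new_dict (update_ord_dict_py old_dict new_dict)

-- ===== LEMMAS AND PROOFS =====

-- the common value both sides assign to an old pair
def resolve (new_dict : List (String × String)) (p : String × String) : String × String :=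
  match new_dict.find? (fun q => q.1 == p.1) with
  | some q => (p.1, q.2)
  | none => p

lemma foldlA_items (new_dict : List (String × String)) :
    ∀ (old : List (String × String)) (d : PySem.Dict String String),
      (old.map Prod.fst).Nodup → (∀ p ∈ old, d.contains p.1 = false) →
      (old.foldl (updA new_dict) d).items = d.items ++ old.map (resolve new_dict) := by
  intro old
  induction old with
  | nil => intro d _ _; simp
  | cons kv rest ih =>
    intro d hnd hfree
    simp only [List.map_cons, List.nodup_cons] at hnd
    have hdk : d.contains kv.1 = false := hfree kv (by simp)
    have step : updA new_dict d kv = d.insert kv.1 (resolve new_dict kv).2 ∧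
        (resolve new_dict kv).1 = kv.1 := by
      unfold updA resolve
      cases hf : new_dict.find? (fun q => q.1 == kv.1) with
      | none =>
        simp only []
        rw [hdk]
        simp
      | some q =>
        have hq' : q.1 = kv.1 := by
          have h := List.find?_some hf
          simpa using h
        simp only [hq']
        rw [PySem.Dict.contains_insert_self]
        simp
    have hni : (d.insert kv.1 (resolve new_dict kv).2).items
        = d.items ++ [(kv.1, (resolve new_dict kv).2)] :=
      PySem.Dict.items_insert_of_not_contains _ _ hdk
    have hfree' : ∀ p ∈ rest, (d.insert kv.1 (resolve new_dict kv).2).contains p.1 = false := by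
      intro p hp
      rw [PySem.Dict.contains_insert]
      have hne : p.1 ≠ kv.1 := fun h => hnd.1 (by rw [← h]; exact List.mem_map_of_mem hp)
      have h1 : (p.1 == kv.1) = false := beq_eq_false_iff_ne.mpr hne
      rw [h1, hfree p (List.mem_cons_of_mem _ hp)]
      rfl
    calc ((kv :: rest).foldl (updA new_dict) d).items
        = (rest.foldl (updA new_dict) (d.insert kv.1 (resolve new_dict kv).2)).items := by
          rw [List.foldl_cons, step.1]
      _ = (d.insert kv.1 (resolve new_dict kv).2).items ++ rest.map (resolve new_dict) :=
          ih _ hnd.2 hfree'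
      _ = d.items ++ (kv :: rest).map (resolve new_dict) := by
          rw [hni]
          have : (kv.1, (resolve new_dict kv).2) = resolve new_dict kv := by
            rw [← step.2]
          simp [this]

lemma foldlB_items :
    ∀ (new_dict : List (String × String)) (d : PySem.Dict String String),
      (new_dict.map Prod.fst).Nodup →
      (new_dict.foldl updB d).items = d.items.map (resolve new_dict) := by
  intro new_dict
  induction new_dict with
  | nil =>
    intro d _
    have hres : resolve ([] : List (String × String)) = id := funext fun p => rfl
    rw [List.foldl_nil, hres, List.map_id]
  | cons kv rest ih =>
    intro d hnd
    simp only [List.map_cons, List.nodup_cons] at hnd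
    have hrestnone : ∀ x : String × String, x.1 = kv.1 →
        rest.find? (fun q => q.1 == x.1) = none := by
      intro x hx
      rw [List.find?_eq_none]
      intro q hq h
      have hqk : q.1 = kv.1 := (eq_of_beq (by simpa using h)).trans hx
      exact hnd.1 (hqk ▸ List.mem_map_of_mem hq)
    rw [List.foldl_cons]
    by_cases hc : d.contains kv.1 = true
    · have hstep : updB d kv = d.insert kv.1 kv.2 := by unfold updB; rw [hc]; rfl
      rw [hstep, ih _ hnd.2, PySem.Dict.items_insert_of_contains _ _ hc, List.map_map]
      apply List.map_congr_left
      intro p _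
      simp only [Function.comp_apply]
      by_cases hpk : p.1 = kv.1
      · have hb : (p.1 == kv.1) = true := by simp [hpk]
        rw [if_pos hb]
        show resolve rest (kv.1, kv.2) = resolve (kv :: rest) p
        unfold resolve
        rw [hrestnone (kv.1, kv.2) rfl,
          List.find?_cons_of_pos (by simp [hpk])]
        simp [hpk]
      · have hb : (p.1 == kv.1) = false := beq_eq_false_iff_ne.mpr hpk
        rw [if_neg (by simp [hb])]
        show resolve rest p = resolve (kv :: rest) p
        unfold resolve
        rw [List.find?_cons_of_neg
          (by simp only [beq_iff_eq]; exact fun h => hpk h.symm)]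
    · have hstep : updB d kv = d := by
        unfold updB
        rw [Bool.eq_false_iff.mpr hc]
        rfl
      rw [hstep, ih _ hnd.2]
      apply List.map_congr_left
      intro p hp
      have hpk : p.1 ≠ kv.1 := by
        intro h
        apply hc
        rw [PySem.Dict.contains_eq_decide_mem_keys]
        simp only [decide_eq_true_eq]
        exact h ▸ (by
          have : p.1 ∈ d.items.map Prod.fst := List.mem_map_of_mem hp
          simpa [PySem.Dict.keys] using this)
      show resolve rest p = resolve (kv :: rest) p
      unfold resolve
      rw [List.find?_cons_of_neg
        (by simp only [beq_iff_eq]; exact fun h => hpk h.symm)]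

lemma ofList_items (old : List (String × String)) (hnd : (old.map Prod.fst).Nodup) :
    (old.foldl (fun d p => d.insert p.1 p.2) PySem.Dict.empty).items = old := by
  have h := PySem.Dict.items_foldl_insert_fresh old Prod.fst Prod.snd PySem.Dict.empty
    (by intro a _; exact PySem.Dict.contains_empty _) hnd
  simpa using h

-- ===== VERDICT (by name: the statement is the Claim_ definition above) =====
theorem update_ord_dict_py_spec : Claim_equal_update_ord_dict_py := by
  intro old_dict new_dict _ hpre
  unfold Spec_update_ord_dict_py update_ord_dict_py update_ord_dict_py_alt
  rw [foldlA_items new_dict old_dict PySem.Dict.empty hpre.1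
      (by intro p _; exact PySem.Dict.contains_empty _),
    foldlB_items new_dict _ hpre.2, ofList_items old_dict hpre.1,
    show (PySem.Dict.empty : PySem.Dict String String).items = [] from rfl,
    List.nil_append]
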